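-- pv_equiv track=rewrite | github.com/miracle173/math-posts | stackexchange/math/minimal_invalid_sudoku/source/blockcheck_sudoku.py | gatherPermutedPositions
-- ===== SOURCE A (Python) =====
-- from itertools import combinations, permutations, product, chain
--
-- def gatherPermutedPositions(aBlock, aFreeSymbolsCount, aBoundedSymbolList):
--     '''
--     returns the positions where the bounded Symbols are located combined with all position combinations for the free symbosl. these are the cells containing 0
--     '''
--     myReachedPositions=set()
--     myBoundedPositions=[(i,j) for (s,i,j) in sorted([(aBlock[i][j], i, j)
--         for i in range(3)
--             for j in range(3) if aBlock[i][j] in aBoundedSymbolList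
--                 ])]
--     myFreePositions=[(i,j) for i in range(3) for  j in range(3) if aBlock[i][j]==0]
--     for myFreePosComb in combinations(myFreePositions, aFreeSymbolsCount):
--         for myConfigPositions in permutations(myFreePosComb):
--             myAllPositions=list(myConfigPositions)
--             myAllPositions.extend(myBoundedPositions)
--             myReachedPositions.add(tuple(myAllPositions))
--     return myReachedPositions
-- ===== SOURCE B (Python) =====
-- def gatherPermutedPositions(aBlock, aFreeSymbolsCount, aBoundedSymbolList):
--     # one fused scan gathers bounded triples and free cells together
--     bounded_triples = []
--     free = []
--     for i in range(3):
--         for j in range(3):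
--             v = aBlock[i][j]
--             if v in aBoundedSymbolList:
--                 bounded_triples.append((v, i, j))
--             if v == 0:
--                 free.append((i, j))
--     bounded_triples.sort()
--     bounded = [(i, j) for (v, i, j) in bounded_triples]
--
--     def perm_into(remaining, acc):
--         # ordered arrangements of 'remaining' appended to acc, finished with bounded
--         if not remaining:
--             return [tuple(acc + bounded)]
--         res = []
--         for idx in range(len(remaining)):
--             res += perm_into(remaining[:idx] + remaining[idx + 1:], acc + [remaining[idx]])
--         return res
--
--     def choose(pool, comb, k):
--         # backtracking: pick k further cells from pool (in order), then permute the pick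
--         if k == 0:
--             return perm_into(comb, [])
--         if not pool:
--             return []
--         return choose(pool[1:], comb + [pool[0]], k - 1) + choose(pool[1:], comb, k)
--
--     return set(choose(free, [], aFreeSymbolsCount))
-- ===== Notes on version B (the rewrite author's own statement) =====
-- stated objective: alternative
-- what changed: Fuses A's two scanning comprehensions into one pass with two accumulators and replaces the itertools combinations+permutations double loop over a mutated set with a single recursive backtracking enumerator (choose/perm_into) of ordered k-arrangements collected into a set at the end.
import Mathlib
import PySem

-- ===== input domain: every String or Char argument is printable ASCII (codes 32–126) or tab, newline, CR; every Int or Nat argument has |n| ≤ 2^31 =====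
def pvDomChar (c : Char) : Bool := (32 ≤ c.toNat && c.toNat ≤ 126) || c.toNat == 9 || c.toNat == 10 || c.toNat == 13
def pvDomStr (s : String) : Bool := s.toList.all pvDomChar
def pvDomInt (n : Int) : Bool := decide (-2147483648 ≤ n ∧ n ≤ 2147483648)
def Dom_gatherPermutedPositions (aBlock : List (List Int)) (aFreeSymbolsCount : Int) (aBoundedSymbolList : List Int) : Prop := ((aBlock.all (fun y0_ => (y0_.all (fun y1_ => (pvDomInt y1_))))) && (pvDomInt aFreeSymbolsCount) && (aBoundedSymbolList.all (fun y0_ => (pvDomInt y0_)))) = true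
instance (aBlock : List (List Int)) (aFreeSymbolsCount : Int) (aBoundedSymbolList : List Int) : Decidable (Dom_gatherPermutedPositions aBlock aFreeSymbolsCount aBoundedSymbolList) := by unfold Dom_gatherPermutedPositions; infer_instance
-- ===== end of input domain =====

-- B fuses A's two scanning comprehensions into one pass with two accumulators and replaces the
-- itertools combinations×permutations double loop by a single recursive backtracking enumerator
-- of ordered k-arrangements; same cost (objective: alternative).

-- ===== PORT A =====
-- aBlock[i][j]; exact under Pre_ (0 ≤ i,j < 3 are in range there)
def pvCell (aBlock : List (List Int)) (i j : Int) : Int :=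
  PySem.List.pyGetD (PySem.List.pyGetD aBlock i []) j 0

-- [(i,j) for (s,i,j) in sorted([(aBlock[i][j], i, j) … if aBlock[i][j] in aBoundedSymbolList])]
-- Python sorts 3-tuples of ints lexicographically: the key maps into the Lex order (exact).
def pvBoundedPositions (aBlock : List (List Int)) (aBoundedSymbolList : List Int) : List (Int × Int) :=
  (PySem.List.sorted
    ((PySem.List.pyRange 0 3 1).flatMap (fun i =>
      ((PySem.List.pyRange 0 3 1).filter
          (fun j => aBoundedSymbolList.contains (pvCell aBlock i j))).map
        (fun j => (pvCell aBlock i j, i, j))))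
    (fun t => toLex (t.1, toLex (t.2.1, t.2.2))) false).map (fun t => (t.2.1, t.2.2))

-- [(i,j) for i in range(3) for j in range(3) if aBlock[i][j]==0]
def pvFreePositions (aBlock : List (List Int)) : List (Int × Int) :=
  (PySem.List.pyRange 0 3 1).flatMap (fun i =>
    ((PySem.List.pyRange 0 3 1).filter (fun j => pvCell aBlock i j == 0)).map (fun j => ((i, j) : Int × Int)))

def gatherPermutedPositions (aBlock : List (List Int)) (aFreeSymbolsCount : Int) (aBoundedSymbolList : List Int) : List (List (Int × Int)) :=
  let myBoundedPositions := pvBoundedPositions aBlock aBoundedSymbolList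
  let myFreePositions := pvFreePositions aBlock
  -- for myFreePosComb in combinations(…): for myConfigPositions in permutations(myFreePosComb): add(…)
  (PySem.List.combinations myFreePositions aFreeSymbolsCount.toNat).foldl
    (fun myReachedPositions myFreePosComb =>
      (PySem.List.permutations myFreePosComb myFreePosComb.length).foldl
        (fun myReachedPositions myConfigPositions =>
          PySem.Set.add myReachedPositions (myConfigPositions ++ myBoundedPositions))
        myReachedPositions)
    PySem.Set.empty

-- ===== PORT B =====
-- perm_into(remaining, acc): ordered arrangements of remaining appended to acc, closed with bounded;
-- remaining[:idx]+remaining[idx+1:] is take/drop; remaining[idx] totalized via [idx]?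
def permIntoB (bounded : List (Int × Int)) (remaining acc : List (Int × Int)) : List (List (Int × Int)) :=
  if remaining.isEmpty then [acc ++ bounded]
  else (List.range remaining.length).flatMap (fun idx =>
    match h : remaining[idx]? with
    | none => []
    | some x => permIntoB bounded (remaining.take idx ++ remaining.drop (idx + 1)) (acc ++ [x]))
termination_by remaining.length
decreasing_by
  have hi : idx < remaining.length := (List.getElem?_eq_some_iff.mp h).1
  simp [List.length_take, List.length_drop]
  omega

-- choose(pool, comb, k): include pool[0] or skip it
def chooseB (bounded : List (Int × Int)) (pool comb : List (Int × Int)) (k : Int) : List (List (Int × Int)) :=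
  if k = 0 then permIntoB bounded comb []
  else
    match pool with
    | [] => []
    | x :: rest => chooseB bounded rest (comb ++ [x]) (k - 1) ++ chooseB bounded rest comb k

def gatherPermutedPositions_alt (aBlock : List (List Int)) (aFreeSymbolsCount : Int) (aBoundedSymbolList : List Int) : List (List (Int × Int)) :=
  -- one fused scan: for i in range(3): for j in range(3): append to bounded_triples / free
  let st := (PySem.List.pyRange 0 3 1).foldl (fun st i =>
      (PySem.List.pyRange 0 3 1).foldl (fun st j =>
        let v := PySem.List.pyGetD (PySem.List.pyGetD aBlock i []) j 0
        (if aBoundedSymbolList.contains v then st.1 ++ [(v, i, j)] else st.1,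
         if v == 0 then st.2 ++ [((i, j) : Int × Int)] else st.2)) st)
    (([], []) : List (Int × Int × Int) × List (Int × Int))
  -- bounded_triples.sort(); bounded = [(i,j) for (v,i,j) in bounded_triples]
  let bounded := (PySem.List.sorted st.1 (fun t => toLex (t.1, toLex (t.2.1, t.2.2))) false).map
    (fun t => (t.2.1, t.2.2))
  PySem.Set.ofList (chooseB bounded st.2 [] aFreeSymbolsCount)

-- ===== PRECONDITION & SPEC =====
-- Pre_ = exactly where Python A returns: the block offers indices 0..2 in both axes
-- (otherwise the comprehensions raise IndexError) and aFreeSymbolsCount ≥ 0 (else combinations raises ValueError).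
def Pre_gatherPermutedPositions (aBlock : List (List Int)) (aFreeSymbolsCount : Int) (aBoundedSymbolList : List Int) : Prop :=
  3 ≤ aBlock.length ∧ (∀ row ∈ aBlock.take 3, 3 ≤ row.length) ∧ 0 ≤ aFreeSymbolsCount
instance (aBlock : List (List Int)) (aFreeSymbolsCount : Int) (aBoundedSymbolList : List Int) : Decidable (Pre_gatherPermutedPositions aBlock aFreeSymbolsCount aBoundedSymbolList) := by unfold Pre_gatherPermutedPositions; infer_instance

def pvWitness_gatherPermutedPositions : List (List Int) × Int × List Int :=
  ([[1, 0, 2], [0, 5, 0], [3, 0, 4]], 2, [1, 3])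

def Spec_gatherPermutedPositions (aBlock : List (List Int)) (aFreeSymbolsCount : Int) (aBoundedSymbolList : List Int) (out : List (List (Int × Int))) : Prop := out = gatherPermutedPositions_alt aBlock aFreeSymbolsCount aBoundedSymbolList
instance (aBlock : List (List Int)) (aFreeSymbolsCount : Int) (aBoundedSymbolList : List Int) (out : List (List (Int × Int))) : Decidable (Spec_gatherPermutedPositions aBlock aFreeSymbolsCount aBoundedSymbolList out) := by unfold Spec_gatherPermutedPositions; infer_instance

-- ===== CLAIM =====
def Claim_equal_gatherPermutedPositions : Prop := ∀ (aBlock : List (List Int)) (aFreeSymbolsCount : Int) (aBoundedSymbolList : List Int), Dom_gatherPermutedPositions aBlock aFreeSymbolsCount aBoundedSymbolList → Pre_gatherPermutedPositions aBlock aFreeSymbolsCount aBoundedSymbolList → Spec_gatherPermutedPositions aBlock aFreeSymbolsCount aBoundedSymbolList (gatherPermutedPositions aBlock aFreeSymbolsCount aBoundedSymbolList)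

-- ===== LEMMAS AND PROOFS =====

-- a foldl whose pair components evolve independently splits into two foldls
theorem foldl_pair_split {α β γ : Type} (l : List γ) (f : α → γ → α) (g : β → γ → β)
    (a : α) (b : β) :
    l.foldl (fun st x => (f st.1 x, g st.2 x)) (a, b) = (l.foldl f a, l.foldl g b) := by
  induction l generalizing a b with
  | nil => rfl
  | cons x t ih => simpa using ih (f a x) (g b x)

-- nested append-if loops over two index lists collect a flatMap of filtered maps
theorem nested_foldl_if {A : Type} (I J : List Int) (P : Int -> Int -> Bool) (f : Int -> Int -> A)
    (acc : List A) :
    I.foldl (fun b i => J.foldl (fun acc j => if P i j then acc ++ [f i j] else acc) b) acc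
      = acc ++ I.flatMap (fun i => (J.filter (P i)).map (f i)) := by
  induction I generalizing acc with
  | nil => simp
  | cons i t ih => simp [PySem.List.foldl_append_if, ih, List.append_assoc, List.flatMap_def]

-- B's fused scan = A's two comprehension lists
theorem scan_split (aBlock : List (List Int)) (aBoundedSymbolList : List Int) :
    ((PySem.List.pyRange 0 3 1).foldl (fun st i =>
      (PySem.List.pyRange 0 3 1).foldl (fun st j =>
        let v := PySem.List.pyGetD (PySem.List.pyGetD aBlock i []) j 0
        (if aBoundedSymbolList.contains v then st.1 ++ [(v, i, j)] else st.1,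
         if v == 0 then st.2 ++ [((i, j) : Int × Int)] else st.2)) st)
      (([], []) : List (Int × Int × Int) × List (Int × Int)))
    = ((PySem.List.pyRange 0 3 1).flatMap (fun i =>
          ((PySem.List.pyRange 0 3 1).filter
              (fun j => aBoundedSymbolList.contains (pvCell aBlock i j))).map
            (fun j => (pvCell aBlock i j, i, j))),
       pvFreePositions aBlock) := by
  have h1 : ∀ (st : List (Int × Int × Int) × List (Int × Int)) (i : Int),
      (PySem.List.pyRange 0 3 1).foldl (fun st j =>
        let v := PySem.List.pyGetD (PySem.List.pyGetD aBlock i []) j 0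
        (if aBoundedSymbolList.contains v then st.1 ++ [(v, i, j)] else st.1,
         if v == 0 then st.2 ++ [((i, j) : Int × Int)] else st.2)) st
      = ((PySem.List.pyRange 0 3 1).foldl
            (fun acc j => if aBoundedSymbolList.contains (pvCell aBlock i j) then
              acc ++ [(pvCell aBlock i j, i, j)] else acc) st.1,
         (PySem.List.pyRange 0 3 1).foldl
            (fun acc j => if pvCell aBlock i j == 0 then acc ++ [((i, j) : Int × Int)] else acc) st.2) := by
    intro st i
    simpa [pvCell] using foldl_pair_split (PySem.List.pyRange 0 3 1)
      (fun acc j => if aBoundedSymbolList.contains (pvCell aBlock i j) then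
          acc ++ [(pvCell aBlock i j, i, j)] else acc)
      (fun acc j => if pvCell aBlock i j == 0 then acc ++ [((i, j) : Int × Int)] else acc) st.1 st.2
  simp only [h1]
  refine (foldl_pair_split (PySem.List.pyRange 0 3 1)
    (fun b i => (PySem.List.pyRange 0 3 1).foldl
        (fun acc j => if aBoundedSymbolList.contains (pvCell aBlock i j) then
          acc ++ [(pvCell aBlock i j, i, j)] else acc) b)
    (fun b i => (PySem.List.pyRange 0 3 1).foldl
        (fun acc j => if pvCell aBlock i j == 0 then acc ++ [((i, j) : Int × Int)] else acc) b)
    [] []).trans ?_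
  refine Prod.ext ?_ ?_
  · simpa using nested_foldl_if (PySem.List.pyRange 0 3 1) (PySem.List.pyRange 0 3 1)
      (fun i j => aBoundedSymbolList.contains (pvCell aBlock i j))
      (fun i j => (pvCell aBlock i j, i, j)) []
  · simpa [pvFreePositions] using nested_foldl_if (PySem.List.pyRange 0 3 1) (PySem.List.pyRange 0 3 1)
      (fun i j => pvCell aBlock i j == 0) (fun i j => ((i, j) : Int × Int)) []

-- B's recursive perm_into = itertools.permutations at full arity, with the accumulator in front
theorem permIntoB_eq_aux (bounded : List (Int × Int)) (n : Nat) :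
    ∀ (remaining acc : List (Int × Int)), remaining.length = n →
    permIntoB bounded remaining acc
      = (PySem.List.permutations remaining n).map (fun p => acc ++ p ++ bounded) := by
  induction n with
  | zero =>
    intro remaining acc h
    have : remaining = [] := List.length_eq_zero_iff.mp h
    subst this
    rw [permIntoB]
    simp [PySem.List.permutations_zero]
  | succ m ih =>
    intro remaining acc h
    have hne : remaining.isEmpty = false := by
      cases remaining with
      | nil => simp at h
      | cons a t => rfl
    rw [permIntoB, if_neg (by simp [hne])]
    rw [h, PySem.List.permutations_succ, List.map_flatMap]
    congr 1
    swap
    · rw [h]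
    funext i
    cases hx : remaining[i]? with
    | none => simp
    | some x =>
      simp only
      rw [← List.eraseIdx_eq_take_drop_succ]
      have hi : i < remaining.length := (List.getElem?_eq_some_iff.mp hx).1
      rw [ih (remaining.eraseIdx i) (acc ++ [x]) (by rw [List.length_eraseIdx_of_lt hi]; omega)]
      simp [List.map_map, Function.comp_def]

-- B's backtracking choose = combinations then perm_into
theorem chooseB_eq (bounded : List (Int × Int)) (pool : List (Int × Int)) (n : Nat) :
    ∀ comb : List (Int × Int),
    chooseB bounded pool comb (n : Int)
      = (PySem.List.combinations pool n).flatMap (fun c => permIntoB bounded (comb ++ c) []) := by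
  induction pool generalizing n with
  | nil =>
    intro comb
    cases n with
    | zero => simp [chooseB, PySem.List.combinations_zero]
    | succ m =>
      rw [chooseB, if_neg (by omega)]
      simp [PySem.List.combinations_nil_succ]
  | cons x rest ih =>
    intro comb
    cases n with
    | zero => simp [chooseB, PySem.List.combinations_zero]
    | succ m =>
      rw [PySem.List.combinations_cons_succ]
      have h1 : ((m + 1 : Nat) : Int) ≠ 0 := by omega
      rw [chooseB, if_neg h1]
      have h2 : ((m + 1 : Nat) : Int) - 1 = (m : Int) := by omega
      rw [h2, ih m, ih (m + 1)]
      rw [List.flatMap_append, List.flatMap_map]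
      simp [List.append_assoc]

theorem gatherPermutedPositions_spec : Claim_equal_gatherPermutedPositions := by
  intro aBlock aFreeSymbolsCount aBoundedSymbolList _ hpre
  obtain ⟨-, -, hk⟩ := hpre
  obtain ⟨n, rfl⟩ := Int.eq_ofNat_of_zero_le hk
  show _ = _
  unfold gatherPermutedPositions gatherPermutedPositions_alt
  rw [scan_split]
  simp only [Int.toNat_natCast, chooseB_eq, List.nil_append]
  unfold pvBoundedPositions
  rw [PySem.Set.ofList_eq_foldl, List.foldl_flatMap]
  congr 1
  funext S c
  rw [permIntoB_eq_aux _ c.length c [] rfl]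
  rw [List.foldl_map]
  simp

-- ===== VERDICT =====
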